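-- pv_equiv track=rewrite | github.com/metalhead6666/EC | jb_int.py | viola
-- ===== SOURCE A (Python) =====
-- def viola(indiv,dimension):
--     # Count violations
--     v = 0
--     for elem in indiv:
-- 	    limite = min(elem-1,dimension-elem)
-- 	    vi = 0
-- 	    for j in range(1,limite+1):
-- 		    if ((elem - j) in indiv) and ((elem+j) in indiv):
-- 			    vi += 1
-- 	    v += vi
--     return v
-- ===== SOURCE B (Python) =====
-- def viola(indiv, dimension):
--     # Count each value's multiplicity once, then enumerate symmetric endpoint
--     # pairs (a, c) of distinct values and add the midpoint's multiplicity.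
--     cnt = {}
--     for x in indiv:
--         cnt[x] = cnt.get(x, 0) + 1
--     vals = list(cnt)
--     total = 0
--     for a in vals:
--         for c in vals:
--             if a < c and a >= 1 and c <= dimension and (a + c) % 2 == 0:
--                 total += cnt.get((a + c) // 2, 0)
--     return total
-- ===== Notes on version B (the rewrite author's own statement) =====
-- stated objective: alternative
-- what changed: Instead of scanning, for every element occurrence, every offset j up to min(elem-1, dimension-elem) with two O(n) list-membership tests each, B builds a count dict of the values once and double-loops over the distinct values only, adding the midpoint's multiplicity for each valid symmetric endpoint pair (a, c).
import Mathlib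
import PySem

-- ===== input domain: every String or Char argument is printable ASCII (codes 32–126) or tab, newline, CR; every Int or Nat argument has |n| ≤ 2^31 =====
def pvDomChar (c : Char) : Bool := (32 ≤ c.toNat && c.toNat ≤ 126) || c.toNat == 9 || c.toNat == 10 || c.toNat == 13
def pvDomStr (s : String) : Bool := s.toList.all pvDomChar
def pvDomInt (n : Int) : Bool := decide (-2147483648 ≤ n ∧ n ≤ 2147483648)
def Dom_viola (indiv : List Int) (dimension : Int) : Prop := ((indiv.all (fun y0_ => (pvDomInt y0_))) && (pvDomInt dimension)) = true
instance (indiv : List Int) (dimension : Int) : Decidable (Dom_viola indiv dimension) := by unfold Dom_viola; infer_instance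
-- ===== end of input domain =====

-- B replaces A's per-element scan over all offsets j (with two list-membership
-- scans per offset) by one counting dict plus a double loop over the DISTINCT
-- values: every symmetric endpoint pair (a, c) contributes the midpoint's
-- multiplicity. Same return value on every input.

-- ===== PORT A =====
def viola (indiv : List Int) (dimension : Int) : Int :=
  indiv.foldl (fun v elem =>
    let limite := min (elem - 1) (dimension - elem)
    let vi := (PySem.List.pyRange 1 (limite + 1) 1).foldl
      (fun vi j => if (elem - j) ∈ indiv ∧ (elem + j) ∈ indiv then vi + 1 else vi) 0
    v + vi) 0

-- ===== PORT B =====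
def viola_alt (indiv : List Int) (dimension : Int) : Int :=
  let cnt := indiv.foldl (fun d x => d.insert x (d.getD x 0 + 1)) PySem.Dict.empty
  let vals := cnt.keys
  vals.foldl (fun total a =>
    vals.foldl (fun total c =>
      if a < c ∧ 1 ≤ a ∧ c ≤ dimension ∧ PySem.Int.mod (a + c) 2 = 0 then
        total + cnt.getD (PySem.Int.floordiv (a + c) 2) 0
      else total) total) 0

-- ===== PRECONDITION & SPEC =====
def Spec_viola (indiv : List Int) (dimension : Int) (out : Int) : Prop := out = viola_alt indiv dimension
instance (indiv : List Int) (dimension : Int) (out : Int) : Decidable (Spec_viola indiv dimension out) := by unfold Spec_viola; infer_instance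

-- ===== CLAIM (what is proved, stated in full; the proofs are below) =====
def Claim_equal_viola : Prop := ∀ (indiv : List Int) (dimension : Int), Dom_viola indiv dimension → Spec_viola indiv dimension (viola indiv dimension)

-- ===== LEMMAS AND PROOFS =====

-- A's per-center count, as a function of the center's VALUE only.
def pvN (indiv : List Int) (dimension m : Int) : Int :=
  ((PySem.List.pyRange 1 (min (m - 1) (dimension - m) + 1) 1).countP
    (fun j => decide ((m - j) ∈ indiv ∧ (m + j) ∈ indiv)) : Int)

-- B's per-pair contribution.
def pvG (indiv : List Int) (dimension a c : Int) : Int :=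
  if a < c ∧ 1 ≤ a ∧ c ≤ dimension ∧ PySem.Int.mod (a + c) 2 = 0 then
    (indiv.count (PySem.Int.floordiv (a + c) 2) : Int)
  else 0

-- generic: a 'total += f x when p x' loop is init + a sum
theorem pv_foldl_add_ite {α : Type} (l : List α) (p : α → Prop) [DecidablePred p]
    (f : α → Int) (init : Int) :
    l.foldl (fun acc x => if p x then acc + f x else acc) init
      = init + (l.map (fun x => if p x then f x else 0)).sum := by
  induction l generalizing init with
  | nil => simp
  | cons x t ih =>
    simp only [List.foldl_cons, List.map_cons, List.sum_cons, ih]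
    split_ifs <;> ring

theorem pv_toFinset_ofList (l : List Int) : (PySem.Set.ofList l).toFinset = l.toFinset := by
  ext x; simp [PySem.Set.mem_ofList]

theorem pv_countP_pyRange (a b : Int) (p : Int → Prop) [DecidablePred p] :
    (PySem.List.pyRange a b 1).countP (fun x => decide (p x))
      = ((Finset.Ico a b).filter p).card := by
  rw [List.countP_eq_length_filter]
  rw [← List.toFinset_card_of_nodup ((PySem.List.nodup_pyRange_one a b).filter _)]
  congr 1
  ext x
  simp [PySem.List.mem_pyRange_one, Finset.mem_Ico]

-- A in normal form: per distinct center value, multiplicity times offset count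
theorem pvA_eq (indiv : List Int) (dimension : Int) :
    viola indiv dimension
      = ∑ m ∈ indiv.toFinset, (indiv.count m : Int) * pvN indiv dimension m := by
  unfold viola
  simp only [PySem.List.foldl_ite_add_one, zero_add]
  rw [PySem.List.foldl_add, zero_add, Finset.sum_list_map_count]
  simp [pvN]

-- B in normal form: the double loop over distinct values as a double Finset sum
theorem pvB_eq (indiv : List Int) (dimension : Int) :
    viola_alt indiv dimension
      = ∑ a ∈ indiv.toFinset, ∑ c ∈ indiv.toFinset, pvG indiv dimension a c := by
  unfold viola_alt
  simp only [PySem.Dict.foldl_insert_getD_add_one_eq_counter, PySem.Dict.keys_counter,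
    PySem.Dict.getD_counter, pv_foldl_add_ite, PySem.List.foldl_add, zero_add]
  rw [← List.sum_toFinset _ (PySem.Set.nodup_ofList indiv), pv_toFinset_ofList]
  refine Finset.sum_congr rfl (fun a _ => ?_)
  rw [← List.sum_toFinset _ (PySem.Set.nodup_ofList indiv), pv_toFinset_ofList]
  exact Finset.sum_congr rfl (fun c _ => by simp [pvG])

-- per-pair contribution expanded over distinct centers
theorem pvG_eq (indiv : List Int) (dimension a c : Int) :
    pvG indiv dimension a c
      = ∑ m ∈ indiv.toFinset, (indiv.count m : Int) *
          (if a < c ∧ 1 ≤ a ∧ c ≤ dimension ∧ a + c = 2 * m then 1 else 0) := by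
  unfold pvG
  by_cases h : a < c ∧ 1 ≤ a ∧ c ≤ dimension
  · by_cases he : PySem.Int.mod (a + c) 2 = 0
    · obtain ⟨m0, hm0⟩ := (PySem.Int.mod_eq_zero_iff_dvd (a + c) 2).mp he
      have hfd : PySem.Int.floordiv (a + c) 2 = m0 := by
        rw [PySem.Int.floordiv_eq_iff_of_pos (by norm_num)]; omega
      have hcond : ∀ m : Int, (a < c ∧ 1 ≤ a ∧ c ≤ dimension ∧ a + c = 2 * m) ↔ m = m0 := by
        intro m; constructor
        · rintro ⟨-, -, -, hm⟩; omega
        · rintro rfl; exact ⟨h.1, h.2.1, h.2.2, by omega⟩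
      simp only [hcond, hfd, if_pos (And.intro h.1 (And.intro h.2.1 (And.intro h.2.2 he))),
        mul_ite, mul_one, mul_zero]
      rw [Finset.sum_ite_eq' indiv.toFinset m0 (fun m => (indiv.count m : Int))]
      by_cases hm : m0 ∈ indiv.toFinset
      · rw [if_pos hm]
      · rw [if_neg hm]
        have : indiv.count m0 = 0 := by
          rw [List.count_eq_zero]; simpa [List.mem_toFinset] using hm
        simp [this]
    · have : ∀ m ∈ indiv.toFinset, (indiv.count m : Int) *
          (if a < c ∧ 1 ≤ a ∧ c ≤ dimension ∧ a + c = 2 * m then 1 else 0) = 0 := by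
        intro m _
        rw [if_neg, mul_zero]
        rintro ⟨-, -, -, hm⟩
        exact he ((PySem.Int.mod_eq_zero_iff_dvd (a + c) 2).mpr ⟨m, hm⟩)
      rw [Finset.sum_eq_zero this, if_neg (by tauto)]
  · rw [if_neg (by tauto), Finset.sum_eq_zero]
    intro m _
    rw [if_neg (by tauto), mul_zero]

-- per-center count as a pair count: the bijection j ↦ (m - j, m + j)
theorem pvN_eq (indiv : List Int) (dimension m : Int) :
    pvN indiv dimension m
      = ∑ a ∈ indiv.toFinset, ∑ c ∈ indiv.toFinset,
          (if a < c ∧ 1 ≤ a ∧ c ≤ dimension ∧ a + c = 2 * m then (1 : Int) else 0) := by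
  unfold pvN
  rw [pv_countP_pyRange]
  rw [← Finset.sum_product' (f := fun a c =>
    (if a < c ∧ 1 ≤ a ∧ c ≤ dimension ∧ a + c = 2 * m then (1 : Int) else 0))]
  rw [Finset.sum_boole]
  norm_cast
  refine Finset.card_bij' (fun j _ => (m - j, m + j)) (fun pr _ => m - pr.1) ?_ ?_ ?_ ?_
  · intro j hj
    simp only [Finset.mem_filter, Finset.mem_Ico] at hj
    simp only [Finset.mem_filter, Finset.mem_product, List.mem_toFinset]
    refine ⟨⟨hj.2.1, hj.2.2⟩, ?_, ?_, ?_, by ring⟩ <;> omega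
  · intro pr hpr
    simp only [Finset.mem_filter, Finset.mem_product, List.mem_toFinset] at hpr
    simp only [Finset.mem_filter, Finset.mem_Ico]
    obtain ⟨⟨h1, h2⟩, hlt, ha, hc, hsum⟩ := hpr
    refine ⟨⟨by omega, by omega⟩, ?_, ?_⟩
    · simpa [show m - (m - pr.1) = pr.1 by ring] using h1
    · have : m + (m - pr.1) = pr.2 := by omega
      rw [this]; exact h2
  · intro j _; dsimp only; omega
  · intro pr hpr
    simp only [Finset.mem_filter, Finset.mem_product, List.mem_toFinset] at hpr
    obtain ⟨-, -, -, -, hsum⟩ := hpr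
    ext <;> simp <;> omega

-- ===== VERDICT (by name: the statement is the Claim_ definition above) =====
theorem viola_spec : Claim_equal_viola := by
  intro indiv dimension _
  unfold Spec_viola
  calc viola indiv dimension
      = ∑ m ∈ indiv.toFinset, ∑ a ∈ indiv.toFinset, ∑ c ∈ indiv.toFinset,
          (indiv.count m : Int) *
            (if a < c ∧ 1 ≤ a ∧ c ≤ dimension ∧ a + c = 2 * m then 1 else 0) := by
        rw [pvA_eq]
        refine Finset.sum_congr rfl (fun m _ => ?_)
        rw [pvN_eq indiv dimension m, Finset.mul_sum]
        exact Finset.sum_congr rfl (fun a _ => by rw [Finset.mul_sum])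
    _ = ∑ a ∈ indiv.toFinset, ∑ m ∈ indiv.toFinset, ∑ c ∈ indiv.toFinset,
          (indiv.count m : Int) *
            (if a < c ∧ 1 ≤ a ∧ c ≤ dimension ∧ a + c = 2 * m then 1 else 0) :=
        Finset.sum_comm
    _ = ∑ a ∈ indiv.toFinset, ∑ c ∈ indiv.toFinset, ∑ m ∈ indiv.toFinset,
          (indiv.count m : Int) *
            (if a < c ∧ 1 ≤ a ∧ c ≤ dimension ∧ a + c = 2 * m then 1 else 0) :=
        Finset.sum_congr rfl (fun a _ => Finset.sum_comm)
    _ = viola_alt indiv dimension := by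
        rw [pvB_eq]
        exact Finset.sum_congr rfl (fun a _ => Finset.sum_congr rfl
          (fun c _ => (pvG_eq indiv dimension a c).symm))
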